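-- pv_equiv track=rewrite | github.com/FayedAlMamun/Practice-Problems | practic_problem .py | lowecaseCome1st
-- ===== SOURCE A (Python) =====
-- def lowecaseCome1st(str):
--     str=sorted(str)
--     lowerpart=''
--     upperpart=''
--     for i in str:
--         if (i.islower()):
--             lowerpart=lowerpart+i
--         else:
--             upperpart=upperpart+i
--     return lowerpart+upperpart
-- ===== SOURCE B (Python) =====
-- def lowecaseCome1st(str):
--     counts = {}
--     for ch in str:
--         counts[ch] = counts.get(ch, 0) + 1
--     keys = sorted(counts)
--     lower = ''.join(ch * counts[ch] for ch in keys if ch.islower())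
--     other = ''.join(ch * counts[ch] for ch in keys if not ch.islower())
--     return lower + other
-- ===== Notes on version B (the rewrite author's own statement) =====
-- stated objective: faster
-- what changed: Instead of sorting every character of the string and partitioning the sorted list element by element with repeated string concatenation, B builds a character counter in one pass, sorts only the distinct characters, and emits each character's whole run at once (lowercase runs first, then the rest).
import Mathlib
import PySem

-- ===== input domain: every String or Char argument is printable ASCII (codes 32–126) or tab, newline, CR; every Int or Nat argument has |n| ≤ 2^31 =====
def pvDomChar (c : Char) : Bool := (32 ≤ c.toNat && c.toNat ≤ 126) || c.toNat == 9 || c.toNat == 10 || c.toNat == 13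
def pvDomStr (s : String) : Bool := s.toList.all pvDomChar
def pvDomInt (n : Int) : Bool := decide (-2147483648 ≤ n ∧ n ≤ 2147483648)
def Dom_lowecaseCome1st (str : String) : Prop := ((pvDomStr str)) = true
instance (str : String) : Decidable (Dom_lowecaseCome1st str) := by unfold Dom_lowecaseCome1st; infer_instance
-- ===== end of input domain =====

-- B replaces "sort every character, then partition with repeated string concatenation" by
-- "count characters in a dict, sort only the distinct characters, emit each run at once" (faster on long inputs).

-- ===== PORT A =====
def lowecaseCome1st (str : String) : String :=
  -- str = sorted(str)
  let s := PySem.List.sorted str.toList (fun c => c) false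
  -- the loop accumulating lowerpart / upperpart (strings as List Char)
  let p := s.foldl (fun (acc : List Char × List Char) i =>
      if PySem.Chars.islower i then (acc.1 ++ [i], acc.2) else (acc.1, acc.2 ++ [i])) ([], [])
  String.ofList (p.1 ++ p.2)

-- ===== PORT B =====
def lowecaseCome1st_alt (str : String) : String :=
  -- counts[ch] = counts.get(ch, 0) + 1
  let counts := str.toList.foldl
      (fun (d : PySem.Dict Char Int) ch => d.insert ch (d.getD ch 0 + 1)) PySem.Dict.empty
  -- keys = sorted(counts)   (iterating a dict yields its keys in insertion order)
  let keys := PySem.List.sorted counts.keys (fun c => c) false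
  -- ''.join(ch * counts[ch] for ch in keys if ch.islower()); ch ∈ keys, so counts[ch] = getD ch 0 (no KeyError)
  let lower := ((keys.filter (fun ch => PySem.Chars.islower ch)).map
      (fun ch => PySem.List.pyRepeat [ch] (counts.getD ch 0))).flatten
  let other := ((keys.filter (fun ch => !PySem.Chars.islower ch)).map
      (fun ch => PySem.List.pyRepeat [ch] (counts.getD ch 0))).flatten
  String.ofList (lower ++ other)

-- ===== PRECONDITION & SPEC =====
def Spec_lowecaseCome1st (str : String) (out : String) : Prop := out = lowecaseCome1st_alt str
instance (str : String) (out : String) : Decidable (Spec_lowecaseCome1st str out) := by unfold Spec_lowecaseCome1st; infer_instance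

-- ===== CLAIM (what is proved, stated in full; the proofs are below) =====
def Claim_equal_lowecaseCome1st : Prop := ∀ (str : String), Dom_lowecaseCome1st str → Spec_lowecaseCome1st str (lowecaseCome1st str)

-- ===== LEMMAS AND PROOFS =====

-- sort key under which A's output (lowercase block first, each block sorted by code) is ordered
def pvKey (c : Char) : Nat := c.toNat + (if PySem.Chars.islower c then 0 else 4294967296)

theorem pvToNat_lt (a : Char) : a.toNat < 4294967296 := a.val.toNat_lt_size

theorem pvKey_inj : Function.Injective pvKey := by
  intro a b h
  unfold pvKey at h
  have ha := pvToNat_lt a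
  have hb := pvToNat_lt b
  have : a.toNat = b.toNat := by
    by_cases h1 : PySem.Chars.islower a <;> by_cases h2 : PySem.Chars.islower b <;>
      simp [h1, h2] at h <;> omega
  exact Char.ext (UInt32.toNat_inj.mp this)

theorem pvKey_le_same (a b : Char) (h : a ≤ b)
    (hq : PySem.Chars.islower a = PySem.Chars.islower b) : pvKey a ≤ pvKey b := by
  have : a.toNat ≤ b.toNat := by simpa [Char.le_def, UInt32.le_iff_toNat_le] using h
  unfold pvKey; rw [hq]; omega

theorem pvKey_le_cross (a b : Char) (ha : PySem.Chars.islower a = true)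
    (hb : PySem.Chars.islower b = false) : pvKey a ≤ pvKey b := by
  have := pvToNat_lt a
  unfold pvKey; rw [ha, hb]; simp; omega

-- count of v in a concatenation of runs over distinct characters
theorem pvCount_flatten (cs : List Char) (n : Char → Nat) (h : cs.Nodup) (v : Char) :
    ((cs.map (fun c => List.replicate (n c) c)).flatten).count v
      = if v ∈ cs then n v else 0 := by
  induction cs with
  | nil => simp
  | cons c cs ih =>
    have hnd := (List.nodup_cons.mp h).2
    have hcmem := (List.nodup_cons.mp h).1
    simp only [List.map_cons, List.flatten_cons, List.count_append, ih hnd,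
      List.count_replicate, List.mem_cons]
    by_cases hv : v = c
    · subst hv; simp [hcmem]
    · simp [hv, Ne.symm hv]

-- every element of such a concatenation is one of the characters
theorem pvMem_flatten (cs : List Char) (n : Char → Nat) (y : Char)
    (h : y ∈ (cs.map (fun c => List.replicate (n c) c)).flatten) : y ∈ cs := by
  rcases List.mem_flatten.mp h with ⟨l, hl, hy⟩
  rcases List.mem_map.mp hl with ⟨c, hc, rfl⟩
  exact (List.eq_of_mem_replicate hy) ▸ hc

-- a concatenation of runs over key-sorted characters is key-sorted
theorem pvPairwise_flatten (cs : List Char) (n : Char → Nat)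
    (h : cs.Pairwise (fun a b => pvKey a ≤ pvKey b)) :
    ((cs.map (fun c => List.replicate (n c) c)).flatten).Pairwise
      (fun a b => pvKey a ≤ pvKey b) := by
  induction cs with
  | nil => simp
  | cons c cs ih =>
    simp only [List.map_cons, List.flatten_cons]
    rcases List.pairwise_cons.mp h with ⟨hhead, htail⟩
    refine List.pairwise_append.mpr ⟨?_, ih htail, ?_⟩
    · exact List.pairwise_replicate.mpr (Or.inr le_rfl)
    · intro x hx y hy
      rw [List.eq_of_mem_replicate hx]
      exact hhead y (pvMem_flatten cs n y hy)

-- the heart of the equivalence: A's partition of the fully sorted string equals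
-- B's run concatenation over the sorted distinct characters
theorem pvMain (xs : List Char) :
    (PySem.List.sorted xs (fun c => c) false).filter (fun i => PySem.Chars.islower i)
      ++ (PySem.List.sorted xs (fun c => c) false).filter (fun i => !PySem.Chars.islower i)
    = (((PySem.List.sorted (PySem.Set.ofList xs) (fun c => c) false).filter
          (fun i => PySem.Chars.islower i)).map (fun c => List.replicate (xs.count c) c)).flatten
      ++ (((PySem.List.sorted (PySem.Set.ofList xs) (fun c => c) false).filter
          (fun i => !PySem.Chars.islower i)).map (fun c => List.replicate (xs.count c) c)).flatten := by
  set q : Char → Bool := fun i => PySem.Chars.islower i with hq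
  set S := PySem.List.sorted xs (fun c => c) false with hS
  set K := PySem.List.sorted (PySem.Set.ofList xs) (fun c => c) false with hK
  have hKlt : K.Pairwise (· < ·) := PySem.List.sorted_ofList_pairwise_lt xs
  have hKnd : K.Nodup := hKlt.imp (fun h => ne_of_lt h)
  have hKmem : ∀ v : Char, v ∈ K ↔ v ∈ xs := by
    intro v
    rw [hK, PySem.List.mem_sorted, PySem.Set.mem_ofList]
  have hSpw : S.Pairwise (· ≤ ·) := PySem.List.sorted_pairwise xs (fun c => c)
  -- permutations to xs
  have hpermL : (S.filter q ++ S.filter (fun i => !q i)).Perm xs :=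
    (List.filter_append_perm q S).trans (PySem.List.sorted_perm xs (fun c => c) false)
  have hpermR : (((K.filter q).map (fun c => List.replicate (xs.count c) c)).flatten
      ++ ((K.filter (fun i => !q i)).map (fun c => List.replicate (xs.count c) c)).flatten).Perm xs := by
    rw [List.perm_iff_count]
    intro v
    rw [List.count_append,
      pvCount_flatten _ _ (hKnd.filter q) v,
      pvCount_flatten _ _ (hKnd.filter (fun i => !q i)) v]
    simp only [List.mem_filter, hKmem v]
    by_cases hvx : v ∈ xs
    · by_cases hqv : q v
      · simp [hvx, hqv]
      · simp [hvx, hqv]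
    · simp [hvx, List.count_eq_zero.mpr hvx]
  -- both sides are pairwise-sorted under pvKey
  have hcrossKey : ∀ a b : Char, q a = true → q b = false → pvKey a ≤ pvKey b := by
    intro a b ha hb
    exact pvKey_le_cross a b (by simpa [hq] using ha) (by simpa [hq] using hb)
  have hpwL : (S.filter q ++ S.filter (fun i => !q i)).Pairwise (fun a b => pvKey a ≤ pvKey b) := by
    refine List.pairwise_append.mpr ⟨?_, ?_, ?_⟩
    · refine (hSpw.filter q).imp_of_mem ?_
      intro a b ha hb hab
      exact pvKey_le_same a b hab
        (show q a = q b by rw [(List.mem_filter.mp ha).2, (List.mem_filter.mp hb).2])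
    · refine (hSpw.filter (fun i => !q i)).imp_of_mem ?_
      intro a b ha hb hab
      have ha' := (List.mem_filter.mp ha).2
      have hb' := (List.mem_filter.mp hb).2
      simp only [Bool.not_eq_eq_eq_not, Bool.not_true] at ha' hb'
      exact pvKey_le_same a b hab (show q a = q b by rw [ha', hb'])
    · intro a ha b hb
      have ha' := (List.mem_filter.mp ha).2
      have hb' := (List.mem_filter.mp hb).2
      exact hcrossKey a b ha' (by simpa using hb')
  have hpwFilter : ∀ p : Char → Bool, (∀ a b : Char, p a = true → p b = true →
        a < b → pvKey a ≤ pvKey b) →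
      (K.filter p).Pairwise (fun a b => pvKey a ≤ pvKey b) := by
    intro p hp
    refine (hKlt.filter p).imp_of_mem ?_
    intro a b ha hb hab
    exact hp a b (List.mem_filter.mp ha).2 (List.mem_filter.mp hb).2 hab
  have hpwR : (((K.filter q).map (fun c => List.replicate (xs.count c) c)).flatten
      ++ ((K.filter (fun i => !q i)).map (fun c => List.replicate (xs.count c) c)).flatten).Pairwise
      (fun a b => pvKey a ≤ pvKey b) := by
    refine List.pairwise_append.mpr ⟨?_, ?_, ?_⟩
    · refine pvPairwise_flatten _ _ (hpwFilter q ?_)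
      intro a b ha hb hab
      exact pvKey_le_same a b (le_of_lt hab) (show q a = q b by rw [ha, hb])
    · refine pvPairwise_flatten _ _ (hpwFilter (fun i => !q i) ?_)
      intro a b ha hb hab
      simp only [Bool.not_eq_eq_eq_not, Bool.not_true] at ha hb
      exact pvKey_le_same a b (le_of_lt hab) (show q a = q b by rw [ha, hb])
    · intro a ha b hb
      have ha' := (List.mem_filter.mp (pvMem_flatten _ _ a ha)).2
      have hb' := (List.mem_filter.mp (pvMem_flatten _ _ b hb)).2
      exact hcrossKey a b ha' (by simpa using hb')
  exact PySem.List.eq_of_perm_of_pairwise_le_of_injective pvKey pvKey_inj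
    (hpermL.trans hpermR.symm) hpwL hpwR

-- ===== VERDICT (by name: the statement is the Claim_ definition above) =====
theorem lowecaseCome1st_spec : Claim_equal_lowecaseCome1st := by
  intro str _
  unfold Spec_lowecaseCome1st lowecaseCome1st lowecaseCome1st_alt
  simp only []
  -- A's loop: split the pair accumulator into two independent folds
  have hA : (fun (acc : List Char × List Char) i =>
        if PySem.Chars.islower i then (acc.1 ++ [i], acc.2) else (acc.1, acc.2 ++ [i]))
      = fun (acc : List Char × List Char) i =>
        ((if PySem.Chars.islower i then acc.1 ++ [i] else acc.1),
         (if PySem.Chars.islower i then acc.2 else acc.2 ++ [i])) := by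
    funext acc i; by_cases h : PySem.Chars.islower i <;> simp [h]
  rw [hA, PySem.List.foldl_prod_mk
    (f := fun acc i => if PySem.Chars.islower i then acc ++ [i] else acc)
    (g := fun acc i => if PySem.Chars.islower i then acc else acc ++ [i])]
  have hG : (fun (acc : List Char) i => if PySem.Chars.islower i then acc else acc ++ [i])
      = fun (acc : List Char) i => if (!PySem.Chars.islower i) then acc ++ [i] else acc := by
    funext acc i; by_cases h : PySem.Chars.islower i <;> simp [h]
  rw [hG, PySem.List.foldl_append_if_eq_filter (fun i => PySem.Chars.islower i),
    PySem.List.foldl_append_if_eq_filter (fun i => !PySem.Chars.islower i)]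
  -- B's counter
  rw [PySem.Dict.foldl_insert_getD_add_one_eq_counter, PySem.Dict.keys_counter]
  simp only [PySem.Dict.getD_counter, PySem.List.pyRepeat_singleton, Int.toNat_natCast,
    List.nil_append]
  exact congrArg String.ofList (pvMain str.toList)
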